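-- pv_equiv track=rewrite | github.com/GuidoHuidobro/TPC-JUEGO-TETRIS | Tetris.py | traducir
-- ===== SOURCE A (Python) =====
-- def traducir(hape, moverse):
--     new_moverse = []
--     for i in hape:
--         if i[0]<15 and i[0]>-1:
--             new_moverse.append([i[0]+moverse,i[1]])
--         else:
--             return hape
--     return new_moverse
-- ===== SOURCE B (Python) =====
-- def traducir(hape, moverse):
--     ok = all(-1 < i[0] < 15 for i in hape)
--     if ok:
--         return [[i[0] + moverse, i[1]] for i in hape]
--     return hape
-- ===== Notes on version B (the rewrite author's own statement) =====
-- stated objective: simpler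
-- what changed: Replaces A's fused check-and-build loop with early return by a separate validation pass (all) followed by a distinct map-style construction pass.
import Mathlib
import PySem

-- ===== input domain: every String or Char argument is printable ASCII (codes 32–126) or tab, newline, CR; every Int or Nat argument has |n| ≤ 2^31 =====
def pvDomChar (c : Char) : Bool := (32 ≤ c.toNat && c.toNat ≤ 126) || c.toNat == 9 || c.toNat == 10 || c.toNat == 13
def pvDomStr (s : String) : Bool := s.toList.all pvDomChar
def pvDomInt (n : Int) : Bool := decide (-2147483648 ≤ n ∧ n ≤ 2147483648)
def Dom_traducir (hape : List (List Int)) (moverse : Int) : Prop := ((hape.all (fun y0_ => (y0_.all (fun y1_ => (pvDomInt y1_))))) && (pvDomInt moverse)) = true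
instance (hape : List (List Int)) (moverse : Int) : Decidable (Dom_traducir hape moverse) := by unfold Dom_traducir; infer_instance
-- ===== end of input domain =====

-- B separates a validation pass (all rows in range) from a construction pass (map); A fuses check and build with an early return.

-- ===== PORT A =====
-- loop over hape, appending to new_moverse, early 'return hape' on an out-of-range row
def traducirGo (hape : List (List Int)) (moverse : Int) (acc : List (List Int)) : List (List Int) → List (List Int)
  | [] => acc
  | i :: rest =>
    if PySem.List.pyGetD i 0 0 < 15 ∧ PySem.List.pyGetD i 0 0 > -1 then
      traducirGo hape moverse (acc ++ [[PySem.List.pyGetD i 0 0 + moverse, PySem.List.pyGetD i 1 0]]) rest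
    else hape

def traducir (hape : List (List Int)) (moverse : Int) : List (List Int) :=
  traducirGo hape moverse [] hape

-- ===== PORT B =====
def traducir_alt (hape : List (List Int)) (moverse : Int) : List (List Int) :=
  let ok := hape.all (fun i => decide (-1 < PySem.List.pyGetD i 0 0 ∧ PySem.List.pyGetD i 0 0 < 15))
  if ok then hape.map (fun i => [PySem.List.pyGetD i 0 0 + moverse, PySem.List.pyGetD i 1 0])
  else hape

-- ===== PRECONDITION & SPEC =====
-- Pre_ excludes exactly the inputs where Python A raises IndexError: a row becomes [] (i[0] fails) or an
-- in-range row of length 1 (i[1] fails) before any out-of-range row triggers the early return.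
def Pre_traducir (hape : List (List Int)) (moverse : Int) : Prop :=
  ∀ k, k < hape.length →
    (∀ j, j < k → 2 ≤ (hape.getD j []).length ∧
        -1 < (hape.getD j []).getD 0 0 ∧ (hape.getD j []).getD 0 0 < 15) →
    (hape.getD k []) ≠ [] ∧
      (2 ≤ (hape.getD k []).length ∨
        ¬(-1 < (hape.getD k []).getD 0 0 ∧ (hape.getD k []).getD 0 0 < 15))
instance (hape : List (List Int)) (moverse : Int) : Decidable (Pre_traducir hape moverse) := by
  unfold Pre_traducir; infer_instance

def pvWitness_traducir : List (List Int) × Int := ([[1, 2], [14, 0], [3, -4]], 5)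

def Spec_traducir (hape : List (List Int)) (moverse : Int) (out : List (List Int)) : Prop := out = traducir_alt hape moverse
instance (hape : List (List Int)) (moverse : Int) (out : List (List Int)) : Decidable (Spec_traducir hape moverse out) := by unfold Spec_traducir; infer_instance

-- ===== CLAIM (what is proved, stated in full; the proofs are below) =====
def Claim_equal_traducir : Prop := ∀ (hape : List (List Int)) (moverse : Int), Dom_traducir hape moverse → Pre_traducir hape moverse → Spec_traducir hape moverse (traducir hape moverse)

-- ===== LEMMAS AND PROOFS =====

-- loop invariant: the fused loop equals "validate the remainder, then append its mapped rows or bail to hape"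
lemma traducirGo_eq (hape : List (List Int)) (m : Int) (acc rest : List (List Int)) :
    traducirGo hape m acc rest =
      if rest.all (fun i => decide (-1 < PySem.List.pyGetD i 0 0 ∧ PySem.List.pyGetD i 0 0 < 15)) then
        acc ++ rest.map (fun i => [PySem.List.pyGetD i 0 0 + m, PySem.List.pyGetD i 1 0])
      else hape := by
  induction rest generalizing acc with
  | nil => simp only [traducirGo, List.all_nil, if_true, List.map_nil, List.append_nil]
  | cons i rest ih =>
    simp only [traducirGo, List.all_cons, List.map_cons]
    by_cases h : -1 < PySem.List.pyGetD i 0 0 ∧ PySem.List.pyGetD i 0 0 < 15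
    · rw [if_pos ⟨h.2, h.1⟩, ih, decide_eq_true h, Bool.true_and]
      by_cases hr : rest.all (fun i => decide (-1 < PySem.List.pyGetD i 0 0 ∧ PySem.List.pyGetD i 0 0 < 15)) = true
      · rw [if_pos hr, if_pos hr, List.append_assoc, List.singleton_append]
      · rw [if_neg hr, if_neg hr]
    · rw [if_neg (fun hc => h ⟨hc.2, hc.1⟩), decide_eq_false h, Bool.false_and,
        if_neg Bool.false_ne_true]

-- ===== VERDICT (by name: the statement is the Claim_ definition above) =====
theorem traducir_spec : Claim_equal_traducir := by
  intro hape moverse _ _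
  unfold Spec_traducir traducir traducir_alt
  rw [traducirGo_eq]
  rfl
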